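-- pv_equiv track=rewrite | github.com/tvsirius/mit_cds_workshops | cdsw1_exercises/mystery_2.py | mystery_2
-- ===== SOURCE A (Python) =====
-- def mystery_2(L: list[list | str | tuple | set], elem) -> list[list | str | tuple | set]:
--     """ Return a list of iterables (or strings, selected from L, where elem is present
--
--     :param L: list of iterables (or strings)
--     :param elem: element to search in the lists (str if L is list of strings)
--     :return: a list of iterables, where elem is present
--     """
--
--     assert isinstance(L, list), "L must be list"
--     assert (len(L) == 0) or (min([isinstance(L[i], (list, tuple, set)) for i in range(len(L))])) or (
--                 min([isinstance(L[i], str) for i in range(len(L))]) and isinstance(elem,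
--                                                                                    str)), "L elements must be iterable or strings when elem is string"
--
--     # base case
--     if len(L) == 0:
--         return []
--     else:
--
--         # checking elem in first list
--         if elem in L[0]:
--             # recursion with including L[0]
--             return [L[0]] + mystery_2(L[1:], elem)
--         else:
--             # recursion without including L[0]
--             return mystery_2(L[1:], elem)
-- ===== SOURCE B (Python) =====
-- def mystery_2(L: list[list | str | tuple | set], elem) -> list[list | str | tuple | set]:
--     """Return a list of iterables (or strings), selected from L, where elem is present."""
--     assert isinstance(L, list), "L must be list"
--     assert (len(L) == 0) or (min([isinstance(L[i], (list, tuple, set)) for i in range(len(L))])) or (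
--                 min([isinstance(L[i], str) for i in range(len(L))]) and isinstance(elem,
--                                                                                    str)), "L elements must be iterable or strings when elem is string"
--     result = []
--     for s in L:
--         if elem in s:
--             result.append(s)
--     return result
-- ===== Notes on version B (the rewrite author's own statement) =====
-- stated objective: simpler
-- what changed: Replaced recursion over L[1:] slices (which copies the tail at every level) with a single iterative forward pass appending matching sublists to an accumulator.
import Mathlib
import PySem

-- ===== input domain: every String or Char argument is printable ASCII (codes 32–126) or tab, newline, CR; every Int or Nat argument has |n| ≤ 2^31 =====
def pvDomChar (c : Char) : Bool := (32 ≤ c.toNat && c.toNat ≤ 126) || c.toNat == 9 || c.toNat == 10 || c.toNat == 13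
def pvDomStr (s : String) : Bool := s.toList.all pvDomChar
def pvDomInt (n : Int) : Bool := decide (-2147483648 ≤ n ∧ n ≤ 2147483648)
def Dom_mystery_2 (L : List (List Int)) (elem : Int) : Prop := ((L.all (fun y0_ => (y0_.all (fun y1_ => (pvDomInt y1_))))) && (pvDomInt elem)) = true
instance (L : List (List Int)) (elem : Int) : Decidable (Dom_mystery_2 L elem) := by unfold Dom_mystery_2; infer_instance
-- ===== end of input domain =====

-- ===== PORT A =====
-- recursion over L: empty -> [], else cons/skip L[0] and recurse on L[1:]
def mystery_2 (L : List (List Int)) (elem : Int) : List (List Int) :=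
  match L with
  | [] => []
  | h :: t => if elem ∈ h then [h] ++ mystery_2 t elem else mystery_2 t elem

-- ===== PORT B =====
-- B: iterative single pass, appending each matching sublist to an accumulator
def mystery_2_alt (L : List (List Int)) (elem : Int) : List (List Int) :=
  L.foldl (fun res s => if elem ∈ s then res ++ [s] else res) []

-- ===== PRECONDITION & SPEC =====
def Spec_mystery_2 (L : List (List Int)) (elem : Int) (out : List (List Int)) : Prop := out = mystery_2_alt L elem
instance (L : List (List Int)) (elem : Int) (out : List (List Int)) : Decidable (Spec_mystery_2 L elem out) := by unfold Spec_mystery_2; infer_instance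

-- ===== CLAIM (what is proved, stated in full; the proofs are below) =====
def Claim_equal_mystery_2 : Prop := ∀ (L : List (List Int)) (elem : Int), Dom_mystery_2 L elem → Spec_mystery_2 L elem (mystery_2 L elem)

-- ===== LEMMAS AND PROOFS =====

-- ===== VERDICT (by name: the statement is the Claim_ definition above) =====
lemma alt_foldl_acc (L : List (List Int)) (elem : Int) (acc : List (List Int)) :
    L.foldl (fun res s => if elem ∈ s then res ++ [s] else res) acc
      = acc ++ mystery_2 L elem := by
  induction L generalizing acc with
  | nil => simp [mystery_2]
  | cons h t ih =>
    simp only [List.foldl, mystery_2]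
    by_cases hc : elem ∈ h <;> simp [hc, ih]

theorem mystery_2_spec : Claim_equal_mystery_2 := by
  intro L elem _
  unfold Spec_mystery_2 mystery_2_alt
  simpa using (alt_foldl_acc L elem []).symm
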